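-- pv_equiv track=rewrite | github.com/patrickfrey/strusWikipediaSearch | scripts/strusnlp.py | splitAbbrev
-- ===== SOURCE A (Python) =====
-- def splitAbbrev( name):
--     rt = []
--     sidx = 0
--     nidx = name.find('.', sidx)
--     while nidx >= 0:
--         rt.append( name[ sidx:nidx+1].strip())
--         sidx = nidx+1
--         nidx = name.find('.', sidx)
--     if sidx < len(name):
--         rt.append( name[sidx:].strip())
--     return rt
-- ===== SOURCE B (Python) =====
-- def splitAbbrev(name):
--     # One left-to-right pass over the characters, accumulating the current
--     # segment in a buffer; a segment is emitted (stripped) at each period and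
--     # a final non-empty buffer is emitted stripped at the end.
--     rt = []
--     seg = []
--     for ch in name:
--         seg.append(ch)
--         if ch == '.':
--             rt.append(''.join(seg).strip())
--             seg = []
--     if seg:
--         rt.append(''.join(seg).strip())
--     return rt
-- ===== Notes on version B (the rewrite author's own statement) =====
-- stated objective: alternative
-- what changed: Replaced A's repeated str.find calls with index bookkeeping and slicing by a single character-by-character pass that accumulates the current segment in a buffer and emits it at each period.
import Mathlib
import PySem

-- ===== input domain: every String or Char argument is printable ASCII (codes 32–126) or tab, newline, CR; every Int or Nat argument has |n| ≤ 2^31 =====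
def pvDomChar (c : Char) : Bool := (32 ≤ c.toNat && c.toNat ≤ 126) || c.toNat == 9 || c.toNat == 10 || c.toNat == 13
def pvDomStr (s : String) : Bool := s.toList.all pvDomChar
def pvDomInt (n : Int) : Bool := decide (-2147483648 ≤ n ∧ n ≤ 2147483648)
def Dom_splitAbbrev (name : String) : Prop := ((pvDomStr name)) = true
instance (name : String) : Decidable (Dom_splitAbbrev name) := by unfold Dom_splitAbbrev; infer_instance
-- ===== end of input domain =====

-- B replaces A's repeated str.find calls with index bookkeeping and slicing by a single
-- character-by-character pass that buffers the current segment (objective: alternative).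

-- ===== PORT A =====
-- A's while loop; state (rt, sidx). fuel is only a termination guard: name.length + 1 always suffices
-- (each iteration moves sidx past the period that was found).
def splitAbbrevLoop (name : String) (fuel : Nat) (rt : List String) (sidx : Nat) : List String :=
  match fuel with
  | 0 => rt
  | fuel + 1 =>
    let nidx := PySem.Str.findFrom name "." (sidx : Int)
    if 0 ≤ nidx then
      splitAbbrevLoop name fuel
        (rt ++ [PySem.Str.strip (PySem.Str.slice name (some (sidx : Int)) (some (nidx + 1)))])
        (nidx.toNat + 1)
    else if (sidx : Int) < PySem.Str.len name then
      rt ++ [PySem.Str.strip (PySem.Str.slice name (some (sidx : Int)) none)]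
    else rt

def splitAbbrev (name : String) : List String :=
  splitAbbrevLoop name (name.toList.length + 1) [] 0

-- ===== PORT B =====
-- B's loop body; state (rt, seg): append ch to seg, at a period emit the stripped segment.
def splitAbbrevStep (p : List String × List Char) (ch : Char) : List String × List Char :=
  let seg := p.2 ++ [ch]
  if ch = '.' then (p.1 ++ [PySem.Str.strip (String.ofList seg)], [])
  else (p.1, seg)

def splitAbbrev_alt (name : String) : List String :=
  let st := name.toList.foldl splitAbbrevStep ([], [])
  if st.2 ≠ [] then st.1 ++ [PySem.Str.strip (String.ofList st.2)] else st.1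

-- ===== PRECONDITION & SPEC =====
def Spec_splitAbbrev (name : String) (out : List String) : Prop := out = splitAbbrev_alt name
instance (name : String) (out : List String) : Decidable (Spec_splitAbbrev name out) := by unfold Spec_splitAbbrev; infer_instance

-- ===== CLAIM (what is proved, stated in full; the proofs are below) =====
def Claim_equal_splitAbbrev : Prop := ∀ (name : String), Dom_splitAbbrev name → Spec_splitAbbrev name (splitAbbrev name)

-- ===== LEMMAS AND PROOFS =====

theorem find_dot_lt_length (l : List Char) (h : 0 ≤ PySem.Chars.find l ['.']) :
    (PySem.Chars.find l ['.']).toNat < l.length := by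
  obtain ⟨hp, -⟩ := PySem.Chars.find_spec h
  have hlen := hp.length_le
  have hle := PySem.Chars.find_le_length l ['.']
  simp [List.length_drop] at hlen
  omega

-- the common characterization: the list of stripped period-terminated segments of l
def gSeg (l : List Char) : List String :=
  if h : 0 ≤ PySem.Chars.find l ['.'] then
    PySem.Str.strip (String.ofList (l.take ((PySem.Chars.find l ['.']).toNat + 1)))
      :: gSeg (l.drop ((PySem.Chars.find l ['.']).toNat + 1))
  else if l ≠ [] then [PySem.Str.strip (String.ofList l)] else []
termination_by l.length
decreasing_by
  have := find_dot_lt_length l h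
  simp [List.length_drop]
  omega

-- A's index loop computes gSeg of the remaining suffix
theorem loopA_eq (name : String) :
    ∀ (fuel sidx : Nat) (rt : List String), sidx ≤ name.toList.length →
      name.toList.length - sidx < fuel →
      splitAbbrevLoop name fuel rt sidx = rt ++ gSeg (name.toList.drop sidx) := by
  intro fuel
  induction fuel with
  | zero => intro sidx rt _ h; omega
  | succ fuel ih =>
    intro sidx rt hs hf
    have hlen : name.toList.length = name.length := String.length_toList
    rw [splitAbbrevLoop]
    simp only [PySem.Str.findFrom_eq]
    have hdot : (".").toList = ['.'] := rfl
    rw [hdot, PySem.Chars.findFrom_natCast name.toList ['.'] sidx hs]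
    set f := PySem.Chars.find (name.toList.drop sidx) ['.'] with hfdef
    clear_value f
    by_cases hneg : f = -1
    · rw [if_pos hneg]
      norm_num
      rw [gSeg, dif_neg (by rw [← hfdef, hneg]; omega)]
      by_cases hlt : sidx < name.toList.length
      · have hstr : PySem.Str.strip (PySem.Str.slice name (some (sidx : Int)) none) =
            PySem.Str.strip (String.ofList (name.toList.drop sidx)) := by
          apply String.toList_inj.mp
          rw [PySem.Str.toList_strip, PySem.Str.toList_strip]
          congr 1
          rw [PySem.Str.toList_slice, PySem.Chars.slice_eq_listSlice,
            PySem.List.slice_from_natCast]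
          simp
        rw [if_pos (String.length_toList ▸ hlt), if_pos (by simp [List.drop_eq_nil_iff]; omega),
          hstr]
      · rw [if_neg (by rw [← String.length_toList]; omega),
          if_neg (by simp [List.drop_eq_nil_iff]; omega)]
        simp
    · have hf0 : 0 ≤ f := by
        have := PySem.Chars.neg_one_le_find (name.toList.drop sidx) ['.']
        rw [← hfdef] at this
        omega
      rw [if_neg hneg, if_pos (by omega)]
      have hflt : f.toNat < (name.toList.drop sidx).length := by
        rw [hfdef] at hf0 ⊢
        exact find_dot_lt_length _ hf0
      simp only [List.length_drop] at hflt
      have hstep : ((sidx : Int) + f).toNat + 1 = sidx + f.toNat + 1 := by omega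
      rw [hstep]
      rw [ih (sidx + f.toNat + 1) _ (by omega) (by omega)]
      conv_rhs => rw [gSeg]
      rw [dif_pos (hfdef ▸ hf0), ← hfdef, List.drop_drop]
      have hslice : PySem.Str.strip (PySem.Str.slice name (some (sidx : Int)) (some ((sidx : Int) + f + 1))) =
          PySem.Str.strip (String.ofList ((name.toList.drop sidx).take (f.toNat + 1))) := by
        apply String.toList_inj.mp
        rw [PySem.Str.toList_strip, PySem.Str.toList_strip, PySem.Str.toList_slice,
          PySem.Chars.slice_eq_listSlice, PySem.List.slice_toNat _ (by omega) (by omega),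
          String.toList_ofList,
          show ((sidx : Int) + f + 1).toNat - ((sidx : Int)).toNat = f.toNat + 1 by omega,
          show ((sidx : Int)).toNat = sidx by omega]
      rw [hslice]
      simp [List.append_assoc, Nat.add_assoc]

theorem dot_mem_iff (l : List Char) : '.' ∈ l ↔ ['.'] <:+: l := by
  constructor
  · intro h
    obtain ⟨s, t, rfl⟩ := List.append_of_mem h
    exact ⟨s, t, by simp⟩
  · intro ⟨s, t, h⟩
    subst h
    simp

theorem fold_no_dot (l : List Char) :
    ∀ (rt : List String) (seg : List Char), '.' ∉ l →
      l.foldl splitAbbrevStep (rt, seg) = (rt, seg ++ l) := by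
  induction l with
  | nil => intro rt seg _; simp
  | cons ch l ih =>
    intro rt seg h
    simp only [List.mem_cons, not_or] at h
    rw [List.foldl_cons, splitAbbrevStep]
    simp only
    rw [if_neg (fun hc => h.1 hc.symm), ih _ _ h.2]
    simp

theorem fold_factor (l : List Char) :
    ∀ (rt : List String) (seg : List Char),
      l.foldl splitAbbrevStep (rt, seg) =
        (rt ++ (l.foldl splitAbbrevStep ([], seg)).1, (l.foldl splitAbbrevStep ([], seg)).2) := by
  induction l with
  | nil => intro rt seg; simp
  | cons ch l ih =>
    intro rt seg
    rw [List.foldl_cons, List.foldl_cons, splitAbbrevStep, splitAbbrevStep]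
    simp only
    by_cases h : ch = '.'
    · rw [if_pos h, if_pos h]
      simp only [List.nil_append]
      rw [ih (rt ++ [PySem.Str.strip (String.ofList (seg ++ [ch]))]) [],
        ih [PySem.Str.strip (String.ofList (seg ++ [ch]))] []]
      simp
    · rw [if_neg h, if_neg h]
      exact ih rt (seg ++ [ch])

def finishB (p : List String × List Char) : List String :=
  if p.2 ≠ [] then p.1 ++ [PySem.Str.strip (String.ofList p.2)] else p.1

theorem finish_append (a : List String) (p : List String × List Char) :
    finishB (a ++ p.1, p.2) = a ++ finishB p := by
  unfold finishB
  split_ifs <;> simp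

theorem get_prefix_drop (l : List Char) (i : Nat) (hi : i < l.length) (h : l[i] = '.') :
    ['.'] <+: l.drop i := by
  have hd : l.drop i = l[i] :: l.drop (i + 1) := List.drop_eq_getElem_cons hi
  rw [hd, h]
  exact ⟨l.drop (i + 1), rfl⟩

-- B's buffered single pass also computes gSeg
theorem B_eq_g (l : List Char) : finishB (l.foldl splitAbbrevStep ([], [])) = gSeg l := by
  induction hn : l.length using Nat.strong_induction_on generalizing l with
  | _ n ih =>
  subst hn
  by_cases hf : 0 ≤ PySem.Chars.find l ['.']
  · obtain ⟨hp, hmin⟩ := PySem.Chars.find_spec hf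
    set j := (PySem.Chars.find l ['.']).toNat with hj
    have hjlt : j < l.length := find_dot_lt_length l hf
    have hdrop : l.drop j = l[j] :: l.drop (j + 1) := List.drop_eq_getElem_cons hjlt
    have hget : l[j] = '.' := by
      obtain ⟨t, ht⟩ := hp
      rw [hdrop] at ht
      exact (List.cons_eq_cons.mp ht).1.symm ▸ rfl
    have hsplit : l = l.take j ++ '.' :: l.drop (j + 1) := by
      conv_lhs => rw [← List.take_append_drop j l]
      rw [hdrop, hget]
    have hnotin : '.' ∉ l.take j := by
      intro hmem
      obtain ⟨i, hi, hgi⟩ := List.mem_iff_getElem.mp hmem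
      have hij : i < j := by simp at hi; omega
      have hilen : i < l.length := lt_of_lt_of_le hij (le_of_lt hjlt)
      rw [List.getElem_take] at hgi
      exact hmin i hij (get_prefix_drop l i hilen hgi)
    have htake : l.take (j + 1) = l.take j ++ ['.'] := by
      rw [List.take_add_one]
      simp [hget, hjlt]
    conv_lhs => rw [hsplit]
    rw [List.foldl_append, fold_no_dot _ _ _ hnotin, List.foldl_cons, splitAbbrevStep]
    simp only [List.nil_append, reduceIte]
    rw [fold_factor, finish_append]
    have hlt2 : (l.drop (j + 1)).length < l.length := by
      simp [List.length_drop]; omega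
    rw [ih _ hlt2 _ rfl]
    conv_rhs => rw [gSeg]
    rw [dif_pos hf, ← hj, htake]
    simp
  · rw [fold_no_dot l [] [] (by
      intro hmem
      exact hf ((PySem.Chars.find_nonneg_iff l ['.']).mpr ((dot_mem_iff l).mp hmem)))]
    rw [gSeg, dif_neg hf]
    simp [finishB]

-- ===== VERDICT (by name: the statement is the Claim_ definition above) =====
theorem splitAbbrev_spec : Claim_equal_splitAbbrev := by
  intro name _
  unfold Spec_splitAbbrev splitAbbrev splitAbbrev_alt
  rw [loopA_eq name (name.toList.length + 1) 0 [] (by omega) (by omega)]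
  simp only [List.drop_zero, List.nil_append]
  rw [← B_eq_g name.toList]
  rfl
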